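-- pv_equiv track=rewrite | github.com/AdrianSeguraOrtiz/MOEBA-BIO | utils/plot_autoconf.py | trim_zeros_from_dict
-- ===== SOURCE A (Python) =====
-- def trim_zeros_from_dict(dictionary):
--     # Encontrar la posición máxima donde al menos un valor no es 0
--     max_len = 0
--     for values in dictionary.values():
--         for i in range(len(values) - 1, -1, -1):
--             if values[i] != 0:
--                 max_len = max(max_len, i + 1)
--                 break
--
--     # Recortar todas las listas hasta la longitud encontrada
--     for key in dictionary:
--         dictionary[key] = dictionary[key][:max_len]
--
--     return dictionary
-- ===== SOURCE B (Python) =====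
-- def trim_zeros_from_dict(dictionary):
--     # Column-major scan from the right: find the last column holding any nonzero.
--     max_global = max((len(v) for v in dictionary.values()), default=0)
--     max_len = 0
--     for c in range(max_global - 1, -1, -1):
--         if any(c < len(v) and v[c] != 0 for v in dictionary.values()):
--             max_len = c + 1
--             break
--     for key in dictionary:
--         dictionary[key] = dictionary[key][:max_len]
--     return dictionary
-- ===== Notes on version B (the rewrite author's own statement) =====
-- stated objective: alternative
-- what changed: Replaces A's per-row right-to-left scan (maximising each row's trimmed length) by a single column-major scan from the rightmost column, stopping at the first column containing any nonzero; truncation is unchanged.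
import Mathlib
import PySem

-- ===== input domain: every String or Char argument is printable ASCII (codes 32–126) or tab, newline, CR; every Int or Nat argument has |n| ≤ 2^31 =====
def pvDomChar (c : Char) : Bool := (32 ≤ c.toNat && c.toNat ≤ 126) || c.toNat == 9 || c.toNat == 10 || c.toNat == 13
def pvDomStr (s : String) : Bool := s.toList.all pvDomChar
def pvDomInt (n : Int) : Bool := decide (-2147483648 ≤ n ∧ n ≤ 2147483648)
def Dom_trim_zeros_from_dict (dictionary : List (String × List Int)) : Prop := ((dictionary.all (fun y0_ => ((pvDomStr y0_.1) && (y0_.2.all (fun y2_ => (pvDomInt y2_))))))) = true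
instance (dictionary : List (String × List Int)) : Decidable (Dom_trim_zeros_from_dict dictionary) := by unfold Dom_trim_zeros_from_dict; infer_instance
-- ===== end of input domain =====

-- B replaces A's per-row right-to-left scans by one column-major scan from the rightmost
-- column (objective: alternative decomposition). Python A mutates its argument in place;
-- the equivalence proved here is about the return value (B performs the same mutation).

-- ===== PORT A =====
-- inner loop of A: 'for i in range(len(values)-1, -1, -1): if values[i] != 0: max_len = max(max_len, i+1); break'
def pvLoopA (values : List Int) : List Int → Int → Int
  | [], maxLen => maxLen
  | i :: rest, maxLen =>
    match PySem.List.pyGet? values i with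
    | some x => if x ≠ 0 then max maxLen (i + 1) else pvLoopA values rest maxLen
    | none => pvLoopA values rest maxLen   -- unreachable: every i produced by the range is in bounds

def trim_zeros_from_dict (dictionary : List (String × List Int)) : List (String × List Int) :=
  let maxLen := dictionary.foldl
    (fun maxLen kv => pvLoopA kv.2 (PySem.List.pyRange ((kv.2.length : Int) - 1) (-1) (-1)) maxLen) 0
  dictionary.map (fun kv => (kv.1, PySem.List.slice kv.2 none (some maxLen)))

-- ===== PORT B =====
-- 'any(c < len(v) and v[c] != 0 for v in dictionary.values())'; the guard makes v[c] in bounds,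
-- so pyGetD with default 0 is exact here
def pvAnyCol (dictionary : List (String × List Int)) (c : Int) : Bool :=
  dictionary.any (fun kv => decide (c < (kv.2.length : Int)) && decide (PySem.List.pyGetD kv.2 c 0 ≠ 0))

-- 'for c in range(max_global - 1, -1, -1): if any(...): max_len = c + 1; break' (else max_len = 0)
def pvLoopB (dictionary : List (String × List Int)) : List Int → Int
  | [] => 0
  | c :: rest => if pvAnyCol dictionary c then c + 1 else pvLoopB dictionary rest

def trim_zeros_from_dict_alt (dictionary : List (String × List Int)) : List (String × List Int) :=
  -- max((len(v) for v in dictionary.values()), default=0): all lengths are ≥ 0, so fold max from 0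
  let maxGlobal := dictionary.foldl (fun acc kv => max acc ((kv.2.length : Int))) 0
  let maxLen := pvLoopB dictionary (PySem.List.pyRange (maxGlobal - 1) (-1) (-1))
  dictionary.map (fun kv => (kv.1, PySem.List.slice kv.2 none (some maxLen)))

-- ===== PRECONDITION & SPEC =====
def Spec_trim_zeros_from_dict (dictionary : List (String × List Int)) (out : List (String × List Int)) : Prop := out = trim_zeros_from_dict_alt dictionary
instance (dictionary : List (String × List Int)) (out : List (String × List Int)) : Decidable (Spec_trim_zeros_from_dict dictionary out) := by unfold Spec_trim_zeros_from_dict; infer_instance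

-- ===== CLAIM (what is proved, stated in full; the proofs are below) =====
def Claim_equal_trim_zeros_from_dict : Prop := ∀ (dictionary : List (String × List Int)), Dom_trim_zeros_from_dict dictionary → Spec_trim_zeros_from_dict dictionary (trim_zeros_from_dict dictionary)

-- ===== LEMMAS AND PROOFS =====

-- the trimmed length of a list: its length after removing trailing zeros
def pvTrim (v : List Int) : Nat := (v.reverse.dropWhile (fun x => x == 0)).length

-- both loops compute (pvT dictionary), the maximum trimmed length
def pvT (d : List (String × List Int)) : Nat := d.foldl (fun acc kv => max acc (pvTrim kv.2)) 0

theorem pvTrim_nil : pvTrim [] = 0 := rfl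

theorem pvTrim_concat (w : List Int) (x : Int) :
    pvTrim (w ++ [x]) = if x = 0 then pvTrim w else w.length + 1 := by
  unfold pvTrim
  rw [List.reverse_append]
  by_cases hx : x = 0 <;> simp [hx]

theorem pvTrim_le_length (v : List Int) : pvTrim v ≤ v.length := by
  unfold pvTrim
  calc (v.reverse.dropWhile (fun x => x == 0)).length
      ≤ v.reverse.length := List.length_dropWhile_le _ _
    _ = v.length := List.length_reverse

theorem pvTrim_tail_zero (v : List Int) : ∀ (i : Nat), pvTrim v ≤ i → i < v.length → v[i]? = some 0 := by
  induction v using List.reverseRecOn with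
  | nil => intro i _ h; simp at h
  | append_singleton w x ih =>
    intro i hle hlt
    rw [pvTrim_concat] at hle
    by_cases hx : x = 0
    · simp only [if_pos hx] at hle
      rcases Nat.lt_or_ge i w.length with h | h
      · rw [List.getElem?_append_left h]; exact ih i hle h
      · have : i = w.length := by simp at hlt; omega
        subst this hx
        simp
    · simp only [if_neg hx] at hle
      simp at hlt; omega

theorem pvTrim_last_nonzero (v : List Int) :
    0 < pvTrim v → ∃ x, v[pvTrim v - 1]? = some x ∧ x ≠ 0 := by
  induction v using List.reverseRecOn with
  | nil => intro h; simp [pvTrim_nil] at h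
  | append_singleton w x ih =>
    intro h
    rw [pvTrim_concat] at *
    by_cases hx : x = 0
    · simp only [if_pos hx] at h ⊢
      obtain ⟨y, hy, hyne⟩ := ih h
      refine ⟨y, ?_, hyne⟩
      rw [List.getElem?_append_left (by have := pvTrim_le_length w; omega)]
      exact hy
    · simp only [if_neg hx]
      exact ⟨x, by simp, hx⟩

-- the descending range of A's and B's loops, structurally
theorem pvRange_down_nil (a : Int) (h : a < 0) : PySem.List.pyRange a (-1) (-1) = [] := by
  unfold PySem.List.pyRange
  simp only [if_neg (by norm_num : ¬((-1:Int) = 0)), if_neg (by norm_num : ¬((0:Int) < -1))]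
  rw [if_neg (by omega : ¬((-1:Int) < a))]
  simp

theorem pvRange_down_cons (a : Int) (h : 0 ≤ a) :
    PySem.List.pyRange a (-1) (-1) = a :: PySem.List.pyRange (a - 1) (-1) (-1) := by
  unfold PySem.List.pyRange
  simp only [if_neg (by norm_num : ¬((-1:Int) = 0)), if_neg (by norm_num : ¬((0:Int) < -1))]
  rw [if_pos (by omega : (-1:Int) < a)]
  have hc : (a - -1 + -(-1) - 1) / -(-1) = a + 1 := by ring_nf; omega
  rw [hc]
  have hn : (a + 1).toNat = a.toNat + 1 := by omega
  rw [hn, List.range_succ_eq_map, List.map_cons, List.map_map]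
  by_cases h0 : (0:Int) ≤ a - 1
  · rw [if_pos (by omega : (-1:Int) < a - 1)]
    have hc2 : (a - 1 - -1 + -(-1) - 1) / -(-1) = a := by ring_nf; omega
    rw [hc2]
    simp only [List.cons.injEq]
    refine ⟨by push_cast; ring, ?_⟩
    apply List.map_congr_left; intro k _
    simp only [Function.comp_apply]
    push_cast; ring
  · have ha : a = 0 := by omega
    subst ha
    norm_num

theorem pvRange_down_mem (n : Nat) : ∀ (a : Int), a ≤ n →
    ∀ i ∈ PySem.List.pyRange a (-1) (-1), 0 ≤ i ∧ i ≤ a := by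
  induction n with
  | zero =>
    intro a ha i hi
    rcases Int.lt_or_le a 0 with h | h
    · rw [pvRange_down_nil a h] at hi; simp at hi
    · have ha0 : a = 0 := by omega
      subst ha0
      rw [pvRange_down_cons 0 le_rfl, show ((0:Int) - 1) = -1 by norm_num,
        pvRange_down_nil (-1) (by norm_num)] at hi
      simp at hi; omega
  | succ m ih =>
    intro a ha i hi
    rcases Int.lt_or_le a 0 with h | h
    · rw [pvRange_down_nil a h] at hi; simp at hi
    · rw [pvRange_down_cons a h] at hi
      rcases List.mem_cons.mp hi with h1 | h1
      · omega
      · have := ih (a - 1) (by omega) i h1; omega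

-- A's inner loop ignores an appended element when every index is in range of the prefix
theorem pvLoopA_shrink (w : List Int) (x : Int) :
    ∀ (is : List Int), (∀ i ∈ is, 0 ≤ i ∧ i < (w.length : Int)) →
    ∀ acc, pvLoopA (w ++ [x]) is acc = pvLoopA w is acc := by
  intro is
  induction is with
  | nil => intro _ _; rfl
  | cons i rest ih =>
    intro hmem acc
    obtain ⟨h0, hlt⟩ := hmem i List.mem_cons_self
    have hget : PySem.List.pyGet? (w ++ [x]) i = PySem.List.pyGet? w i := by
      rw [PySem.List.pyGet?_of_nonneg _ h0, PySem.List.pyGet?_of_nonneg _ h0,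
        List.getElem?_append_left (by omega)]
    have hrest := fun j hj => hmem j (List.mem_cons_of_mem _ hj)
    simp only [pvLoopA, hget]
    match hw : PySem.List.pyGet? w i with
    | some y =>
      by_cases hy : y ≠ 0
      · simp [hy]
      · simp [hy, ih hrest acc]
    | none => simp [ih hrest acc]

-- A's inner loop computes max acc (pvTrim v)
theorem pvLoopA_eq (v : List Int) : ∀ (acc : Int), 0 ≤ acc →
    pvLoopA v (PySem.List.pyRange ((v.length : Int) - 1) (-1) (-1)) acc = max acc (pvTrim v) := by
  induction v using List.reverseRecOn with
  | nil =>
    intro acc hacc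
    rw [show ((([] : List Int).length : Int) - 1) = -1 by simp, pvRange_down_nil (-1) (by norm_num)]
    simp [pvLoopA, pvTrim_nil]
    omega
  | append_singleton w x ih =>
    intro acc hacc
    have hlen : (((w ++ [x]).length : Int) - 1) = (w.length : Int) := by simp
    rw [hlen, pvRange_down_cons _ (by positivity)]
    have hget : PySem.List.pyGet? (w ++ [x]) (w.length : Int) = some x := by
      rw [PySem.List.pyGet?_natCast]; simp
    simp only [pvLoopA, hget]
    by_cases hx : x = 0
    · have hmem : ∀ i ∈ PySem.List.pyRange ((w.length : Int) - 1) (-1) (-1),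
          0 ≤ i ∧ i < (w.length : Int) := by
        intro i hi
        have h := pvRange_down_mem w.length ((w.length : Int) - 1) (by omega) i hi
        exact ⟨h.1, by omega⟩
      rw [if_neg (by simp [hx]), pvLoopA_shrink w x _ hmem acc, ih acc hacc,
        pvTrim_concat, if_pos hx]
    · rw [if_pos (by simp [hx]), pvTrim_concat, if_neg hx]
      push_cast; ring_nf

-- A's outer fold computes pvT
theorem pvFoldA_eq (d : List (String × List Int)) : ∀ (acc : Nat),
    d.foldl (fun m kv => pvLoopA kv.2 (PySem.List.pyRange ((kv.2.length : Int) - 1) (-1) (-1)) m)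
      (acc : Int)
    = ((d.foldl (fun m kv => max m (pvTrim kv.2)) acc : Nat) : Int) := by
  induction d with
  | nil => intro acc; rfl
  | cons kv rest ih =>
    intro acc
    simp only [List.foldl_cons]
    rw [pvLoopA_eq kv.2 (acc : Int) (by positivity),
      show (max (acc : Int) (pvTrim kv.2)) = ((max acc (pvTrim kv.2) : Nat) : Int) by push_cast; rfl,
      ih]

-- foldl max is bounded below by its accumulator
theorem pv_le_foldl (d : List (String × List Int)) : ∀ (acc : Nat),
    acc ≤ d.foldl (fun m kv => max m (pvTrim kv.2)) acc := by
  induction d with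
  | nil => intro acc; exact le_rfl
  | cons p rest ih =>
    intro acc
    calc acc ≤ max acc (pvTrim p.2) := le_max_left _ _
      _ ≤ _ := ih _

-- pvT bounds each row's trimmed length
theorem pvT_fold_ge (d : List (String × List Int)) : ∀ (acc : Nat), ∀ kv ∈ d,
    pvTrim kv.2 ≤ d.foldl (fun m kv => max m (pvTrim kv.2)) acc := by
  induction d with
  | nil => intro _ kv h; simp at h
  | cons p rest ih =>
    intro acc kv hkv
    rcases List.mem_cons.mp hkv with h | h
    · subst h
      simp only [List.foldl_cons]
      calc pvTrim kv.2 ≤ max acc (pvTrim kv.2) := le_max_right _ _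
        _ ≤ _ := pv_le_foldl rest _
    · exact ih (max acc (pvTrim p.2)) kv h

-- pvT is attained (or equals the accumulator)
theorem pvT_attained (d : List (String × List Int)) : ∀ (acc : Nat),
    d.foldl (fun m kv => max m (pvTrim kv.2)) acc = acc ∨
    ∃ kv ∈ d, d.foldl (fun m kv => max m (pvTrim kv.2)) acc = pvTrim kv.2 := by
  induction d with
  | nil => intro acc; left; rfl
  | cons p rest ih =>
    intro acc
    simp only [List.foldl_cons]
    rcases ih (max acc (pvTrim p.2)) with h | ⟨kv, hkv, h⟩
    · rcases Nat.le_total acc (pvTrim p.2) with hle | hle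
      · right; exact ⟨p, List.mem_cons_self, by rw [h]; omega⟩
      · left; rw [h]; omega
    · right; exact ⟨kv, List.mem_cons_of_mem _ hkv, h⟩

-- B's global maximum length, as a Nat
def pvMNat (d : List (String × List Int)) : Nat := d.foldl (fun acc kv => max acc kv.2.length) 0

theorem pvFoldLen_eq (d : List (String × List Int)) : ∀ (acc : Nat),
    d.foldl (fun acc kv => max acc ((kv.2.length : Int))) (acc : Int)
    = ((d.foldl (fun acc kv => max acc kv.2.length) acc : Nat) : Int) := by
  induction d with
  | nil => intro acc; rfl
  | cons p rest ih =>
    intro acc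
    simp only [List.foldl_cons]
    rw [show (max (acc : Int) ((p.2.length : Int))) = ((max acc p.2.length : Nat) : Int) by
      push_cast; rfl, ih]

-- pvT ≤ pvMNat: trimmed lengths never exceed lengths, fold-wise
theorem pvT_le_MNat (d : List (String × List Int)) : ∀ (acc₁ acc₂ : Nat), acc₁ ≤ acc₂ →
    d.foldl (fun m kv => max m (pvTrim kv.2)) acc₁ ≤ d.foldl (fun m kv => max m kv.2.length) acc₂ := by
  induction d with
  | nil => intro _ _ h; exact h
  | cons p rest ih =>
    intro acc₁ acc₂ h
    simp only [List.foldl_cons]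
    exact ih _ _ (by have := pvTrim_le_length p.2; omega)

-- the column test, characterised
theorem pvAnyCol_false (d : List (String × List Int)) (n : Nat) (h : pvT d ≤ n) :
    pvAnyCol d (n : Int) = false := by
  unfold pvAnyCol
  rw [List.any_eq_false]
  intro kv hkv
  by_cases hlt : ((n : Int) < (kv.2.length : Int))
  · have hlen : n < kv.2.length := by exact_mod_cast hlt
    have htr : pvTrim kv.2 ≤ n := le_trans (pvT_fold_ge d 0 kv hkv) h
    have hz := pvTrim_tail_zero kv.2 n htr hlen
    have : PySem.List.pyGetD kv.2 (n : Int) 0 = 0 := by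
      rw [PySem.List.pyGetD_natCast]
      simp [List.getD, hz]
    simp [this]
  · simp [hlt]

theorem pvAnyCol_true (d : List (String × List Int)) (n : Nat) (h : pvT d = n + 1) :
    pvAnyCol d (n : Int) = true := by
  rcases pvT_attained d 0 with h0 | ⟨kv, hkv, hk⟩
  · rw [pvT] at h; omega
  · have htr : pvTrim kv.2 = n + 1 := by rw [← hk]; exact h
    obtain ⟨x, hx, hxne⟩ := pvTrim_last_nonzero kv.2 (by omega)
    rw [htr] at hx
    simp only [Nat.add_sub_cancel] at hx
    have hlen : n < kv.2.length := by
      have h1 := pvTrim_le_length kv.2; omega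
    unfold pvAnyCol
    rw [List.any_eq_true]
    refine ⟨kv, hkv, ?_⟩
    have : PySem.List.pyGetD kv.2 (n : Int) 0 = x := by
      rw [PySem.List.pyGetD_natCast]
      simp [List.getD, hx]
    simp [this, hxne]
    exact_mod_cast hlen

-- B's loop computes pvT, starting from any column count ≥ pvT
theorem pvLoopB_eq (d : List (String × List Int)) : ∀ (n : Nat), pvT d ≤ n →
    pvLoopB d (PySem.List.pyRange ((n : Int) - 1) (-1) (-1)) = ((pvT d : Nat) : Int) := by
  intro n
  induction n with
  | zero =>
    intro h
    rw [show (((0 : Nat) : Int) - 1) = -1 by norm_num, pvRange_down_nil (-1) (by norm_num)]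
    have : pvT d = 0 := by omega
    simp [pvLoopB, this]
  | succ m ih =>
    intro h
    rw [show (((m + 1 : Nat) : Int) - 1) = ((m : Nat) : Int) by push_cast; ring,
      pvRange_down_cons _ (by positivity)]
    simp only [pvLoopB]
    rcases Nat.lt_or_ge (pvT d) (m + 1) with hlt | hge
    · rw [pvAnyCol_false d m (by omega)]
      simp only [Bool.false_eq_true, if_false]
      exact ih (by omega)
    · have heq : pvT d = m + 1 := by omega
      rw [pvAnyCol_true d m heq]
      simp [heq]

-- ===== VERDICT (by name: the statement is the Claim_ definition above) =====
theorem trim_zeros_from_dict_spec : Claim_equal_trim_zeros_from_dict := by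
  intro d _
  unfold Spec_trim_zeros_from_dict trim_zeros_from_dict trim_zeros_from_dict_alt
  have hA : d.foldl
      (fun maxLen kv => pvLoopA kv.2 (PySem.List.pyRange ((kv.2.length : Int) - 1) (-1) (-1)) maxLen) 0
      = ((pvT d : Nat) : Int) := by
    have := pvFoldA_eq d 0
    simpa [pvT] using this
  have hM : d.foldl (fun acc kv => max acc ((kv.2.length : Int))) 0 = ((pvMNat d : Nat) : Int) := by
    have := pvFoldLen_eq d 0
    simpa [pvMNat] using this
  have hB : pvLoopB d (PySem.List.pyRange ((d.foldl (fun acc kv => max acc ((kv.2.length : Int))) 0) - 1) (-1) (-1))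
      = ((pvT d : Nat) : Int) := by
    rw [hM]
    exact pvLoopB_eq d (pvMNat d) (pvT_le_MNat d 0 0 le_rfl)
  simp only [hA, hB]
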